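-- pv_equiv track=rewrite | github.com/pypi-data/pypi-mirror-391 | packages/ngcsdk/ngcsdk-4.9.10-py3-none-any.whl/basecommand/printer/batch.py | _convert_query_result_to_new_telemetry_format
-- ===== SOURCE A (Python) =====
-- def _convert_query_result_to_new_telemetry_format(measurement_list, name_list, time_list):
--     line_count = 0
--     field1_count = 0
--     final_row = []
--     new_format = []
--
--     if line_count == 0:
--         for name_item in name_list:
--             if field1_count == 0:
--                 final_row.append("Time")
--                 field1_count += 1
--             # In order to match with UI implementation, need to change measurement query result type
--             # 'ngcjob_appmetrics_' to 'App Metrics:'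
--             final_row.append(name_item.replace("ngcjob_appmetrics_", "App Metrics:"))
--             field1_count += 1
--         new_format.append(final_row)
--         line_count += 1
--
--     final_row = []
--     for time_item in time_list:
--         final_row.append(time_item)
--         for name_item in name_list:
--             # record a '' if query result is not available for the specified time interval
--             add_item = ""
--             for row in measurement_list[1:]:
--                 # The original telemetry csv format is 'Name,Time,Measurement'
--                 name_ele = row[0]
--                 time_ele = row[1]
--                 value_ele = row[2]
--                 if time_ele == time_item and name_ele == name_item:
--                     add_item = value_ele
--             final_row.append(add_item)
--         new_format.append(final_row)
--         final_row = []
--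
--     return new_format
-- ===== SOURCE B (Python) =====
-- def _convert_query_result_to_new_telemetry_format(measurement_list, name_list, time_list):
--     # Build a (time, name) -> value index once (last occurrence wins), then fill cells by O(1) lookup.
--     header = (["Time"] + [n.replace("ngcjob_appmetrics_", "App Metrics:") for n in name_list]) if name_list else []
--     table = {}
--     for row in measurement_list[1:]:
--         table[(row[1], row[0])] = row[2]
--     return [header] + [[t] + [table.get((t, n), "") for n in name_list] for t in time_list]
-- ===== Notes on version B (the rewrite author's own statement) =====
-- stated objective: faster
-- what changed: Replaces the triple nested scan (for each time and name, rescan all measurement rows) by one pass building a (time,name)->value dict with O(1) cell lookups, and builds the header/rows with comprehensions instead of counter-driven appends.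
-- outside the precondition, e.g. on _convert_query_result_to_new_telemetry_format([[], ['x']], [], ['t']): A returns [[], ['t']], B raises IndexError
import Mathlib
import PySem

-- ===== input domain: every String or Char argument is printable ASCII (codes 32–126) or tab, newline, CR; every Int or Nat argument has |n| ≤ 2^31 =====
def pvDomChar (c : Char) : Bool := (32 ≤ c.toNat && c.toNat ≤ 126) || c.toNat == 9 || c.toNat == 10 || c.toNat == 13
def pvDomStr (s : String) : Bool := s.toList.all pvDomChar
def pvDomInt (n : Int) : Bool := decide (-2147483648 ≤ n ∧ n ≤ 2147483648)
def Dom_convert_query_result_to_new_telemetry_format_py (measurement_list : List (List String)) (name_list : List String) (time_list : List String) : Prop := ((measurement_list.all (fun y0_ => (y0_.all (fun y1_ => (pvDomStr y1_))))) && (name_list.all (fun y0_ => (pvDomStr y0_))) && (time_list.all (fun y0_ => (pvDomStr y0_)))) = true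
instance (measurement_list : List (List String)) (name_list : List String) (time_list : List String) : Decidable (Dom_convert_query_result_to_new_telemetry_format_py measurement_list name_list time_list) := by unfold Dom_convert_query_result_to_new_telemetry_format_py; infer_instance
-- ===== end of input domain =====

-- B replaces A's triple nested scan by a one-pass (time,name)->value dictionary with O(1) cell lookups.


-- ===== PORT A =====
-- name_item.replace("ngcjob_appmetrics_", "App Metrics:")
def pvRepl (s : String) : String := PySem.Str.replace s "ngcjob_appmetrics_" "App Metrics:"

-- A's header loop: state (final_row, field1_count) starting ([], 0)
def pvHeaderStepA (st : List String × Int) (name_item : String) : List String × Int :=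
  let st2 := if st.2 == 0 then (st.1 ++ ["Time"], st.2 + 1) else st
  (st2.1 ++ [pvRepl name_item], st2.2 + 1)

-- A's inner scan over measurement_list[1:] for one (time_item, name_item) cell; row[0]/row[1]/row[2]
-- are total via pyGetD (Python raises IndexError on a short row: excluded by Pre_ below)
def pvCellA (measurement_list : List (List String)) (time_item name_item : String) : String :=
  (PySem.List.slice measurement_list (some 1) none).foldl
    (fun add_item row =>
      if PySem.List.pyGetD row 1 "" == time_item && PySem.List.pyGetD row 0 "" == name_item
      then PySem.List.pyGetD row 2 "" else add_item) ""

def convert_query_result_to_new_telemetry_format_py (measurement_list : List (List String)) (name_list : List String) (time_list : List String) : List (List String) :=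
  let final_row := (name_list.foldl pvHeaderStepA ([], 0)).1
  let new_format := [final_row]
  time_list.foldl
    (fun new_format time_item =>
      new_format ++ [name_list.foldl (fun final_row name_item => final_row ++ [pvCellA measurement_list time_item name_item]) [time_item]])
    new_format

-- ===== PORT B =====
-- one pass over measurement_list[1:]: table[(row[1], row[0])] = row[2] (last write wins)
def pvTableB (measurement_list : List (List String)) : PySem.Dict (String × String) String :=
  (PySem.List.slice measurement_list (some 1) none).foldl
    (fun d row => d.insert (PySem.List.pyGetD row 1 "", PySem.List.pyGetD row 0 "") (PySem.List.pyGetD row 2 ""))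
    PySem.Dict.empty

def convert_query_result_to_new_telemetry_format_py_alt (measurement_list : List (List String)) (name_list : List String) (time_list : List String) : List (List String) :=
  let header := if name_list.isEmpty then ([] : List String) else "Time" :: name_list.map pvRepl
  let table := pvTableB measurement_list
  header :: time_list.map (fun t => t :: name_list.map (fun n => table.getD (t, n) ""))

-- ===== PRECONDITION & SPEC =====
-- Pre_ excludes inputs with a measurement row (after the first) of fewer than 3 fields: there Python A
-- raises IndexError whenever name_list and time_list are both nonempty, and on the remaining (degenerate,
-- empty-list) corner A returns while B's own index-building pass still raises IndexError.
def Pre_convert_query_result_to_new_telemetry_format_py (measurement_list : List (List String)) (name_list : List String) (time_list : List String) : Prop :=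
  ∀ row ∈ measurement_list.drop 1, 3 ≤ row.length
instance (measurement_list : List (List String)) (name_list : List String) (time_list : List String) : Decidable (Pre_convert_query_result_to_new_telemetry_format_py measurement_list name_list time_list) := by unfold Pre_convert_query_result_to_new_telemetry_format_py; infer_instance

def pvWitness_convert_query_result_to_new_telemetry_format_py : List (List String) × List String × List String :=
  ([["name", "time", "value"], ["cpu", "t1", "7"]], ["cpu"], ["t1", "t2"])

def Spec_convert_query_result_to_new_telemetry_format_py (measurement_list : List (List String)) (name_list : List String) (time_list : List String) (out : List (List String)) : Prop := out = convert_query_result_to_new_telemetry_format_py_alt measurement_list name_list time_list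
instance (measurement_list : List (List String)) (name_list : List String) (time_list : List String) (out : List (List String)) : Decidable (Spec_convert_query_result_to_new_telemetry_format_py measurement_list name_list time_list out) := by unfold Spec_convert_query_result_to_new_telemetry_format_py; infer_instance

-- ===== CLAIM (what is proved, stated in full; the proofs are below) =====
def Claim_equal_convert_query_result_to_new_telemetry_format_py : Prop := ∀ (measurement_list : List (List String)) (name_list : List String) (time_list : List String), Dom_convert_query_result_to_new_telemetry_format_py measurement_list name_list time_list → Pre_convert_query_result_to_new_telemetry_format_py measurement_list name_list time_list → Spec_convert_query_result_to_new_telemetry_format_py measurement_list name_list time_list (convert_query_result_to_new_telemetry_format_py measurement_list name_list time_list)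

-- ===== LEMMAS AND PROOFS =====

-- once field1_count is positive, A's header loop only appends the mapped names
lemma headerA_tail (l : List String) : ∀ (fr : List String) (c : Int), 0 < c →
    (l.foldl pvHeaderStepA (fr, c)).1 = fr ++ l.map pvRepl := by
  induction l with
  | nil => intro fr c _; simp
  | cons x xs ih =>
    intro fr c hc
    have hne : (c == 0) = false := by simp; omega
    simp only [List.foldl_cons, pvHeaderStepA, hne, Bool.false_eq_true, if_false,
      List.map_cons]
    rw [ih (fr ++ [pvRepl x]) (c + 1) (by omega)]
    simp

-- A's header equals B's header
lemma headerA_eq (name_list : List String) :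
    (name_list.foldl pvHeaderStepA ([], 0)).1 =
      (if name_list.isEmpty then ([] : List String) else "Time" :: name_list.map pvRepl) := by
  cases name_list with
  | nil => simp
  | cons x xs =>
    simp only [List.foldl_cons, List.isEmpty_cons, Bool.false_eq_true, if_false]
    have h0 : pvHeaderStepA ([], 0) x = (["Time", pvRepl x], 2) := by
      simp [pvHeaderStepA]
    rw [h0, headerA_tail xs ["Time", pvRepl x] 2 (by omega)]
    simp

-- the last-match scan of A equals a lookup in the overwrite dict of B
lemma scan_eq_dict (rows : List (List String)) : ∀ (d : PySem.Dict (String × String) String) (ti ni : String),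
    (rows.foldl
        (fun d row => d.insert (PySem.List.pyGetD row 1 "", PySem.List.pyGetD row 0 "") (PySem.List.pyGetD row 2 ""))
        d).getD (ti, ni) "" =
      rows.foldl
        (fun add_item row =>
          if PySem.List.pyGetD row 1 "" == ti && PySem.List.pyGetD row 0 "" == ni
          then PySem.List.pyGetD row 2 "" else add_item)
        (d.getD (ti, ni) "") := by
  induction rows with
  | nil => intro d ti ni; rfl
  | cons r rs ih =>
    intro d ti ni
    simp only [List.foldl_cons]
    rw [ih]
    congr 1
    rw [PySem.Dict.getD_insert]
    by_cases h : (ti, ni) = (PySem.List.pyGetD r 1 "", PySem.List.pyGetD r 0 "")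
    · have h1 : PySem.List.pyGetD r 1 "" = ti := (Prod.mk.injEq _ _ _ _ ▸ h).1.symm
      have h2 : PySem.List.pyGetD r 0 "" = ni := (Prod.mk.injEq _ _ _ _ ▸ h).2.symm
      simp [h, h1, h2]
    · have : ¬ (PySem.List.pyGetD r 1 "" == ti && PySem.List.pyGetD r 0 "" == ni) = true := by
        simp only [Bool.and_eq_true, beq_iff_eq]
        intro hc
        exact h (by rw [hc.1, hc.2])
      simp [h, this]

lemma cellA_eq (measurement_list : List (List String)) (ti ni : String) :
    pvCellA measurement_list ti ni = (pvTableB measurement_list).getD (ti, ni) "" := by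
  rw [pvTableB, scan_eq_dict]
  rfl

-- ===== VERDICT (by name: the statement is the Claim_ definition above) =====
theorem convert_query_result_to_new_telemetry_format_py_spec : Claim_equal_convert_query_result_to_new_telemetry_format_py := by
  intro measurement_list name_list time_list _ _
  unfold Spec_convert_query_result_to_new_telemetry_format_py
  unfold convert_query_result_to_new_telemetry_format_py convert_query_result_to_new_telemetry_format_py_alt
  simp only [PySem.List.foldl_append_singleton_eq_map, headerA_eq, cellA_eq,
    List.singleton_append]
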